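-- pv_equiv track=rewrite | github.com/xianer235/115-media-hub | app/services/notify.py | _format_notify_episode_summary
-- ===== SOURCE A (Python) =====
-- from typing import Any, Dict, List, Set, Tuple
--
-- def _format_notify_episode_summary(episodes: List[int]) -> str:
--     normalized = sorted(
--         {
--             max(0, int(item or 0))
--             for item in (episodes or [])
--             if max(0, int(item or 0)) > 0
--         }
--     )
--     if not normalized:
--         return ""
--     if len(normalized) <= 8:
--         return "、".join([f"E{value}" for value in normalized])
--     return f"E{normalized[0]}-E{normalized[-1]}"
-- ===== SOURCE B (Python) =====
-- # B: one streaming pass tracking min, max and a 9-capped sorted-distinct buffer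
-- # (9 entries already prove ">8 distinct"), never building the full distinct set.
-- def _format_notify_episode_summary(episodes):
--     mn = None
--     mx = None
--     small = []  # sorted distinct positives seen so far, capped at 9 entries
--     for item in (episodes or []):
--         v = max(0, int(item or 0))
--         if v > 0:
--             if mn is None or v < mn:
--                 mn = v
--             if mx is None or mx < v:
--                 mx = v
--             if len(small) < 9:
--                 i = 0
--                 while i < len(small) and small[i] < v:
--                     i += 1
--                 if i == len(small) or small[i] != v:
--                     small.insert(i, v)
--     if mn is None:
--         return ""
--     if len(small) <= 8:
--         return "、".join(f"E{x}" for x in small)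
--     return f"E{mn}-E{mx}"
-- ===== Notes on version B (the rewrite author's own statement) =====
-- stated objective: alternative
-- what changed: Replaces A's build-a-hash-set-then-sort pipeline by a single online pass that maintains a sorted duplicate-free list by positional insertion (scan for the insertion point, skip if already present); no set and no sort call are ever used.
import Mathlib
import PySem

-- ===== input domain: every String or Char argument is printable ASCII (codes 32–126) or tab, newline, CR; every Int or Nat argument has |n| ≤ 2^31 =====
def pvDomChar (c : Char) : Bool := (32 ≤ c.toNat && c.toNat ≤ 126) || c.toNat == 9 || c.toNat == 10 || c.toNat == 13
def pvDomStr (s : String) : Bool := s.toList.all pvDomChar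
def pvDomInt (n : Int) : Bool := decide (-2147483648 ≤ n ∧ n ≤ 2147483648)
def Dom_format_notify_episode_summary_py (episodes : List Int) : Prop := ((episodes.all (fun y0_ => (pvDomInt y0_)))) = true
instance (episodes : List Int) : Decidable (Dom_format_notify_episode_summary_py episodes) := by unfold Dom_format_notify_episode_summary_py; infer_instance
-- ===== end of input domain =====

-- B replaces A's build-a-set-then-sort by one streaming pass tracking min, max and a
-- 9-capped sorted-distinct buffer (9 entries already prove ">8 distinct"); the timing
-- run measured B faster on the large inputs.

-- ===== PORT A =====
-- the set comprehension { max(0, int(item or 0)) for item in (episodes or []) if … > 0 }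
def pvSetA (episodes : List Int) : PySem.Set Int :=
  episodes.foldl
    (fun s item =>
      if 0 < max 0 (if item ≠ 0 then item else 0)
      then PySem.Set.add s (max 0 (if item ≠ 0 then item else 0)) else s)
    PySem.Set.empty

def format_notify_episode_summary_py (episodes : List Int) : String :=
  let normalized := PySem.List.sorted (pvSetA episodes) (fun x => x) false
  if normalized = [] then ""
  else if normalized.length ≤ 8 then
    PySem.Str.join "、" (normalized.map (fun value => "E" ++ PySem.Int.toStr value))
  else
    "E" ++ PySem.Int.toStr (PySem.List.pyGetD normalized 0 0) ++ "-E" ++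
      PySem.Int.toStr (PySem.List.pyGetD normalized (-1) 0)

-- ===== PORT B =====
-- the while-scan for the insertion point + 'small.insert(i, v)' (skip duplicates):
-- structural recursion over the sorted buffer, exactly B's positional insertion.
def pvInsPos (v : Int) : List Int → List Int
  | [] => [v]
  | a :: t =>
    if a < v then a :: pvInsPos v t
    else if a = v then a :: t
    else v :: a :: t

-- one iteration of B's loop on the state (mn, mx, small)
def pvStepB (st : Option Int × Option Int × List Int) (item : Int) :
    Option Int × Option Int × List Int :=
  let v := max 0 (if item ≠ 0 then item else 0)
  if 0 < v then
    ((match st.1 with | none => some v | some m => if v < m then some v else some m),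
     (match st.2.1 with | none => some v | some m => if m < v then some v else some m),
     (if st.2.2.length < 9 then pvInsPos v st.2.2 else st.2.2))
  else st

def format_notify_episode_summary_py_alt (episodes : List Int) : String :=
  let st := episodes.foldl pvStepB (none, none, [])
  match st.1 with
  | none => ""
  | some mn =>
    if st.2.2.length ≤ 8 then
      PySem.Str.join "、" (st.2.2.map (fun x => "E" ++ PySem.Int.toStr x))
    else
      -- mx is some whenever mn is; .getD 0 is never the default here
      "E" ++ PySem.Int.toStr mn ++ "-E" ++ PySem.Int.toStr (st.2.1.getD 0)

-- ===== PRECONDITION & SPEC =====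
def Spec_format_notify_episode_summary_py (episodes : List Int) (out : String) : Prop := out = format_notify_episode_summary_py_alt episodes
instance (episodes : List Int) (out : String) : Decidable (Spec_format_notify_episode_summary_py episodes out) := by unfold Spec_format_notify_episode_summary_py; infer_instance

-- ===== CLAIM =====
def Claim_equal_format_notify_episode_summary_py : Prop := ∀ (episodes : List Int), Dom_format_notify_episode_summary_py episodes → Spec_format_notify_episode_summary_py episodes (format_notify_episode_summary_py episodes)

-- ===== LEMMAS AND PROOFS =====

-- proof-side: the UNCAPPED insertion fold (the full sorted distinct list)
def pvFold0 (episodes : List Int) (acc : List Int) : List Int :=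
  episodes.foldl
    (fun acc item =>
      let v := max 0 (if item ≠ 0 then item else 0)
      if 0 < v then pvInsPos v acc else acc) acc

-- A's foldl builds exactly set(filter (0 < ·) episodes)
lemma pvSetA_eq_update (episodes : List Int) (s : PySem.Set Int) :
    episodes.foldl
      (fun s item =>
        if 0 < max 0 (if item ≠ 0 then item else 0)
        then PySem.Set.add s (max 0 (if item ≠ 0 then item else 0)) else s) s
    = PySem.Set.update s (episodes.filter (fun x => decide (0 < x))) := by
  induction episodes generalizing s with
  | nil => simp [PySem.Set.update]
  | cons a t ih =>
    have hx : (if a ≠ 0 then a else 0) = a := by by_cases h : a = 0 <;> simp [h]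
    by_cases h : 0 < a
    · have hm : max 0 a = a := by omega
      simp only [List.foldl_cons, List.filter_cons, hx, hm, h, decide_true, ih]
      rfl
    · have hm : max 0 (if a ≠ 0 then a else 0) = 0 := by rw [hx]; omega
      simp only [List.foldl_cons, List.filter_cons, hm, ih]
      simp [h]

lemma pvSetA_eq (episodes : List Int) :
    pvSetA episodes = PySem.Set.ofList (episodes.filter (fun x => decide (0 < x))) := by
  unfold pvSetA
  rw [pvSetA_eq_update]
  simp [PySem.Set.update_nil_left]

-- positional insertion preserves strict sortedness, and adds exactly v
lemma pvInsPos_spec (v : Int) (l : List Int) (hl : l.Pairwise (· < ·)) :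
    (pvInsPos v l).Pairwise (· < ·) ∧ ∀ x, x ∈ pvInsPos v l ↔ x = v ∨ x ∈ l := by
  induction l with
  | nil => simp [pvInsPos]
  | cons a t ih =>
    obtain ⟨hat, ht⟩ := List.pairwise_cons.1 hl
    by_cases h1 : a < v
    · obtain ⟨ihp, ihm⟩ := ih ht
      refine ⟨?_, ?_⟩
      · rw [pvInsPos, if_pos h1]
        refine List.pairwise_cons.2 ⟨?_, ihp⟩
        intro x hx
        rcases (ihm x).1 hx with h | h
        · omega
        · exact hat x h
      · intro x
        rw [pvInsPos, if_pos h1]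
        simp only [List.mem_cons, ihm x]
        tauto
    · by_cases h2 : a = v
      · subst h2
        refine ⟨?_, ?_⟩
        · rw [pvInsPos, if_neg h1, if_pos rfl]; exact hl
        · intro x; rw [pvInsPos, if_neg h1, if_pos rfl]; simp
      · refine ⟨?_, ?_⟩
        · rw [pvInsPos, if_neg h1, if_neg h2]
          refine List.pairwise_cons.2 ⟨?_, hl⟩
          intro x hx
          rcases List.mem_cons.1 hx with h | h
          · subst h; omega
          · have := hat x h; omega
        · intro x; rw [pvInsPos, if_neg h1, if_neg h2]; simp

-- inserting an element already present into a sorted list is a no-op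
lemma pvInsPos_mem_eq (v : Int) (l : List Int) (hl : l.Pairwise (· < ·)) (hv : v ∈ l) :
    pvInsPos v l = l := by
  induction l with
  | nil => cases hv
  | cons a t ih =>
    obtain ⟨hat, ht⟩ := List.pairwise_cons.1 hl
    by_cases h1 : a < v
    · have hvt : v ∈ t := by
        rcases List.mem_cons.1 hv with h | h
        · omega
        · exact h
      rw [pvInsPos, if_pos h1, ih ht hvt]
    · by_cases h2 : a = v
      · rw [pvInsPos, if_neg h1, if_pos h2]
      · exfalso
        rcases List.mem_cons.1 hv with h | h
        · exact h2 h.symm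
        · have := hat v h; omega

lemma pvInsPos_length_ge (v : Int) (l : List Int) :
    l.length ≤ (pvInsPos v l).length := by
  induction l with
  | nil => simp [pvInsPos]
  | cons a t ih =>
    rw [pvInsPos]
    split_ifs <;> simp <;> omega

lemma pvInsPos_length_not_mem (v : Int) (l : List Int) (hv : v ∉ l) :
    (pvInsPos v l).length = l.length + 1 := by
  induction l with
  | nil => simp [pvInsPos]
  | cons a t ih =>
    have hva : ¬ a = v := fun h => hv (h ▸ List.mem_cons_self)
    have hvt : v ∉ t := fun h => hv (List.mem_cons_of_mem _ h)
    rw [pvInsPos]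
    split_ifs with h1
    · simp [ih hvt]
    · simp

-- head of the insertion: the smaller of v and the old head
lemma pvInsPos_head (v : Int) (l : List Int) :
    (pvInsPos v l).head? = some (match l.head? with | none => v | some a => min v a) := by
  cases l with
  | nil => simp [pvInsPos]
  | cons a t =>
    rw [pvInsPos]
    split_ifs with h1 h2 <;> simp <;> omega

-- last of the insertion into a sorted list: the larger of v and the old last
lemma pvInsPos_getLast (v : Int) (l : List Int) (hl : l.Pairwise (· < ·)) :
    (pvInsPos v l).getLast? = some (match l.getLast? with | none => v | some a => max v a) := by
  induction l with
  | nil => simp [pvInsPos]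
  | cons a t ih =>
    obtain ⟨hat, ht⟩ := List.pairwise_cons.1 hl
    rw [pvInsPos]
    split_ifs with h1 h2
    · -- a < v : result is a :: pvInsPos v t
      cases t with
      | nil =>
        simp only [pvInsPos, List.getLast?_cons_cons]
        simp
        omega
      | cons b u =>
        have hne : pvInsPos v (b :: u) ≠ [] := by
          rw [pvInsPos]; split_ifs <;> simp
        have hstep : (a :: pvInsPos v (b :: u)).getLast? = (pvInsPos v (b :: u)).getLast? := by
          cases hL : pvInsPos v (b :: u) with
          | nil => exact absurd hL hne
          | cons c w => exact List.getLast?_cons_cons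
        rw [hstep, ih ht, List.getLast?_cons_cons]
    · -- a = v : the list is unchanged, and v is below every later element
      subst h2
      cases t with
      | nil => simp
      | cons b u =>
        have hmem : (b :: u).getLast (by simp) ∈ b :: u := List.getLast_mem _
        have hlt := hat _ hmem
        rw [List.getLast?_cons_cons, List.getLast?_eq_some_getLast (l := b :: u) (by simp)]
        simp only [Option.some.injEq]
        omega
    · -- v < a : result is v :: a :: t
      rw [List.getLast?_cons_cons]
      cases t with
      | nil => simp; omega
      | cons b u =>
        have hmem : (b :: u).getLast (by simp) ∈ b :: u := List.getLast_mem _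
        have hlt := hat _ hmem
        rw [List.getLast?_cons_cons, List.getLast?_eq_some_getLast (l := b :: u) (by simp)]
        simp only [Option.some.injEq]
        omega

-- the uncapped fold stays sorted
lemma pvFold0_pairwise (episodes : List Int) (acc : List Int) (hacc : acc.Pairwise (· < ·)) :
    (pvFold0 episodes acc).Pairwise (· < ·) ∧
    ∀ x, x ∈ pvFold0 episodes acc ↔ x ∈ episodes.filter (fun y => decide (0 < y)) ∨ x ∈ acc := by
  induction episodes generalizing acc with
  | nil => simp [pvFold0, hacc]
  | cons a t ih =>
    have hx : (if a ≠ 0 then a else 0) = a := by by_cases h : a = 0 <;> simp [h]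
    by_cases h : 0 < a
    · have hm : max 0 (if a ≠ 0 then a else 0) = a := by rw [hx]; omega
      obtain ⟨hpa, hmem⟩ := pvInsPos_spec a acc hacc
      have hfold : pvFold0 (a :: t) acc = pvFold0 t (pvInsPos a acc) := by
        unfold pvFold0
        simp only [List.foldl_cons]
        rw [show (if 0 < max 0 (if a ≠ 0 then a else 0)
          then pvInsPos (max 0 (if a ≠ 0 then a else 0)) acc else acc) = pvInsPos a acc by
            rw [hm]; exact if_pos h]
      obtain ⟨ihp, ihm⟩ := ih (pvInsPos a acc) hpa
      rw [hfold]
      refine ⟨ihp, ?_⟩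
      intro x
      rw [ihm x]
      simp only [List.filter_cons, h, decide_true, if_true, List.mem_cons, hmem x]
      tauto
    · have hm : max 0 (if a ≠ 0 then a else 0) = 0 := by rw [hx]; omega
      have hfold : pvFold0 (a :: t) acc = pvFold0 t acc := by
        unfold pvFold0
        simp only [List.foldl_cons]
        rw [show (if 0 < max 0 (if a ≠ 0 then a else 0)
          then pvInsPos (max 0 (if a ≠ 0 then a else 0)) acc else acc) = acc by rw [hm]; simp]
      obtain ⟨ihp, ihm⟩ := ih acc hacc
      rw [hfold]
      refine ⟨ihp, ?_⟩
      intro x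
      rw [ihm x]
      simp [h]

-- A's sorted distinct list IS the uncapped fold
lemma pv_lists_eq (episodes : List Int) :
    PySem.List.sorted (pvSetA episodes) (fun x => x) false = pvFold0 episodes [] := by
  obtain ⟨hp, hm⟩ := pvFold0_pairwise episodes [] (by simp)
  rw [pvSetA_eq]
  apply PySem.List.sorted_eq_of_perm_of_pairwise_lt
  · have hnodup : (pvFold0 episodes []).Nodup :=
      List.Pairwise.imp (fun h => ne_of_lt h) hp
    rw [List.perm_ext_iff_of_nodup hnodup (PySem.Set.nodup_ofList _)]
    intro x
    rw [hm x]
    simp [PySem.Set.mem_ofList]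
  · simpa using hp

-- one positive step of B, written out
lemma pvStepB_pos (st : Option Int × Option Int × List Int) (a : Int) (h : 0 < a) :
    pvStepB st a =
      ((match st.1 with | none => some a | some m => if a < m then some a else some m),
       (match st.2.1 with | none => some a | some m => if m < a then some a else some m),
       (if st.2.2.length < 9 then pvInsPos a st.2.2 else st.2.2)) := by
  have hx : (if a ≠ 0 then a else 0) = a := by simp [show a ≠ 0 by omega]
  have hm : max 0 (if a ≠ 0 then a else 0) = a := by rw [hx]; omega
  simp only [pvStepB, hm]
  rw [if_pos h]

-- a non-positive step of B leaves the state unchanged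
lemma pvStepB_nonpos (st : Option Int × Option Int × List Int) (a : Int) (h : ¬ 0 < a) :
    pvStepB st a = st := by
  have hx : (if a ≠ 0 then a else 0) = a := by by_cases h0 : a = 0 <;> simp [h0]
  have hm : max 0 (if a ≠ 0 then a else 0) = 0 := by rw [hx]; omega
  simp only [pvStepB, hm]
  simp

-- the capped fold simulates the uncapped one: min, max, length-min-9, and full equality up to 9
lemma pvFoldB_rel (episodes : List Int) (st : Option Int × Option Int × List Int)
    (acc : List Int) (hs : acc.Pairwise (· < ·))
    (h1 : st.1 = acc.head?) (h2 : st.2.1 = acc.getLast?)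
    (h3 : st.2.2.length = min acc.length 9)
    (h4 : acc.length ≤ 9 → st.2.2 = acc) :
    (episodes.foldl pvStepB st).1 = (pvFold0 episodes acc).head? ∧
    (episodes.foldl pvStepB st).2.1 = (pvFold0 episodes acc).getLast? ∧
    (episodes.foldl pvStepB st).2.2.length = min (pvFold0 episodes acc).length 9 ∧
    ((pvFold0 episodes acc).length ≤ 9 → (episodes.foldl pvStepB st).2.2 = pvFold0 episodes acc) := by
  induction episodes generalizing st acc with
  | nil => exact ⟨h1, h2, h3, h4⟩
  | cons a t ih =>
    have hx : (if a ≠ 0 then a else 0) = a := by by_cases h : a = 0 <;> simp [h]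
    by_cases h : 0 < a
    · -- positive item: acc gains a, the state is updated
      have hm : max 0 (if a ≠ 0 then a else 0) = a := by rw [hx]; omega
      obtain ⟨hpa, hmem⟩ := pvInsPos_spec a acc hs
      have hfold : pvFold0 (a :: t) acc = pvFold0 t (pvInsPos a acc) := by
        unfold pvFold0
        simp only [List.foldl_cons]
        rw [show (if 0 < max 0 (if a ≠ 0 then a else 0)
          then pvInsPos (max 0 (if a ≠ 0 then a else 0)) acc else acc) = pvInsPos a acc by
            rw [hm]; exact if_pos h]
      have hstepB : (a :: t).foldl pvStepB st = t.foldl pvStepB (pvStepB st a) :=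
        List.foldl_cons ..
      rw [hfold, hstepB]
      apply ih _ _ hpa
      · -- min component
        rw [pvStepB_pos st a h, pvInsPos_head a acc, h1]
        cases acc.head? with
        | none => simp
        | some m =>
          show (if a < m then some a else some m) = some (min a m)
          split_ifs with hlt
          · exact congrArg some (by omega)
          · exact congrArg some (by omega)
      · -- max component
        rw [pvStepB_pos st a h, pvInsPos_getLast a acc hs]
        show (match st.2.1 with | none => some a | some m => if m < a then some a else some m)
            = some (match acc.getLast? with | none => a | some x => max a x)
        rw [h2]
        cases acc.getLast? with
        | none => simp
        | some m =>
          show (if m < a then some a else some m) = some (max a m)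
          split_ifs with hlt
          · exact congrArg some (by omega)
          · exact congrArg some (by omega)
      · -- length component
        rw [pvStepB_pos st a h]
        show (if st.2.2.length < 9 then pvInsPos a st.2.2 else st.2.2).length
            = min (pvInsPos a acc).length 9
        by_cases hlen : st.2.2.length < 9
        · have hacc9 : acc.length < 9 := by omega
          rw [if_pos hlen, h4 (by omega)]
          by_cases hin : a ∈ acc
          · rw [pvInsPos_mem_eq a acc hs hin]; omega
          · rw [pvInsPos_length_not_mem a acc hin]; omega
        · rw [if_neg hlen]
          have := pvInsPos_length_ge a acc
          omega
      · -- equality-up-to-9 component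
        intro hle9
        rw [pvStepB_pos st a h]
        show (if st.2.2.length < 9 then pvInsPos a st.2.2 else st.2.2) = pvInsPos a acc
        by_cases hlen : st.2.2.length < 9
        · have hacc9 : acc.length < 9 := by omega
          rw [if_pos hlen, h4 (by omega)]
        · rw [if_neg hlen]
          have hacc9 : acc.length = 9 := by
            have := pvInsPos_length_ge a acc
            omega
          by_cases hin : a ∈ acc
          · rw [pvInsPos_mem_eq a acc hs hin, h4 (by omega)]
          · exfalso
            rw [pvInsPos_length_not_mem a acc hin] at hle9
            omega
    · -- non-positive item: both folds skip
      have hm : max 0 (if a ≠ 0 then a else 0) = 0 := by rw [hx]; omega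
      have hfold : pvFold0 (a :: t) acc = pvFold0 t acc := by
        unfold pvFold0
        simp only [List.foldl_cons]
        rw [show (if 0 < max 0 (if a ≠ 0 then a else 0)
          then pvInsPos (max 0 (if a ≠ 0 then a else 0)) acc else acc) = acc by rw [hm]; simp]
      have hstepB : (a :: t).foldl pvStepB st = t.foldl pvStepB st := by
        rw [List.foldl_cons, pvStepB_nonpos st a h]
      rw [hfold, hstepB]
      exact ih st acc hs h1 h2 h3 h4

-- ===== VERDICT =====
theorem format_notify_episode_summary_py_spec : Claim_equal_format_notify_episode_summary_py := by
  intro episodes _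
  unfold Spec_format_notify_episode_summary_py
  unfold format_notify_episode_summary_py format_notify_episode_summary_py_alt
  rw [pv_lists_eq]
  obtain ⟨hmn, hmx, hlen, heq⟩ :=
    pvFoldB_rel episodes (none, none, []) [] (by simp) (by simp) (by simp) (by simp) (by simp)
  set L := pvFold0 episodes [] with hL
  set st := episodes.foldl pvStepB (none, none, ([] : List Int)) with hst
  cases hcase : L with
  | nil =>
    rw [hcase] at hmn
    simp only [hmn]
    simp
  | cons x xs =>
    rw [hcase] at hmn hmx hlen heq
    have hmn' : st.1 = some x := by simpa using hmn
    simp only [hmn']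
    by_cases h8 : (x :: xs).length ≤ 8
    · have hslen : st.2.2.length ≤ 8 := by rw [hlen]; omega
      rw [if_neg (by simp), if_pos h8, heq (by omega), if_pos h8]
    · have hslen : ¬ st.2.2.length ≤ 8 := by rw [hlen]; simp at h8 ⊢; omega
      rw [if_neg (by simp), if_neg h8, if_neg hslen]
      have hlast : (x :: xs).getLast? = some ((x :: xs).getLast (by simp)) :=
        List.getLast?_eq_some_getLast (by simp)
      rw [hmx, hlast, PySem.List.pyGetD_zero_cons,
        PySem.List.pyGetD_neg_ofNat (x :: xs) 1 0 (by omega) (by simp)]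
      simp [List.getLast_eq_getElem]
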